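-- pv_equiv track=rewrite | github.com/jm-kor-00/BaekjoonStudy | Contest/KoreatechContest_10/B.py | getFlipCount
-- ===== SOURCE A (Python) =====
-- def getFlipCount(a:int,b:int,c:int)->int:
--     cnt = 0
--     #정수의 최대 크기를 고려
--     for i in range(0,32):
--         pos = 1 << i # ** 시프트로 비트 위치를 맞춤 **
--         tmp = c & pos # 우주에서 보낸 신호의 i번째 자리의 값 => 0 or 1
--         if tmp == 0:
--             if a & pos :
--                 cnt += 1
--             if b & pos :
--                 cnt += 1
--         elif not (a & pos or b & pos):
--                 cnt += 1
--
--     return cnt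
-- ===== SOURCE B (Python) =====
-- def getFlipCount(a: int, b: int, c: int) -> int:
--     # closed form over the low 32 bits: flips = popcount(a & ~c) + popcount(b & ~c) + popcount(~a & ~b & c)
--     mask = (1 << 32) - 1
--     A = a & mask
--     B = b & mask
--     C = c & mask
--     nC = C ^ mask
--
--     def pop(n: int) -> int:
--         cnt = 0
--         while n:
--             cnt += n & 1
--             n >>= 1
--         return cnt
--
--     return pop(A & nC) + pop(B & nC) + pop((A ^ mask) & (B ^ mask) & C)
-- ===== Notes on version B (the rewrite author's own statement) =====
-- stated objective: faster
-- what changed: Replaced the 32-iteration per-bit branching loop with a closed form: three masked bitwise combinations (a&~c, b&~c, ~a&~b&c over the low 32 bits) whose popcounts are summed.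
import Mathlib
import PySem

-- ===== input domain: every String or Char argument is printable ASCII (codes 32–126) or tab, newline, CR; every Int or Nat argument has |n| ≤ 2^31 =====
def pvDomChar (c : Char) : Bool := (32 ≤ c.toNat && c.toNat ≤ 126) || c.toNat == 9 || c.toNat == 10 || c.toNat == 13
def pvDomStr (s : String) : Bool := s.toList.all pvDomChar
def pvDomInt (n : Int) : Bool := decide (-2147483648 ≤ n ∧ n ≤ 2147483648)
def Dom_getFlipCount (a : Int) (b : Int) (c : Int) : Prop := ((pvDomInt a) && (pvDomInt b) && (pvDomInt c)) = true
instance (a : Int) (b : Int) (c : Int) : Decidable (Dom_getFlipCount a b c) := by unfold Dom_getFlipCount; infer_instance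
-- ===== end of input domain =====

-- B replaces A's 32-iteration per-bit branching loop by three masked popcounts (closed form); equal on all inputs.

-- ===== PORT A =====
-- loop body of A; cnt is the accumulator, i the loop index (0 ≤ i < 32, so i.toNat is exact for 1 << i)
def pvStepA (a b c : Int) (cnt : Int) (i : Int) : Int :=
  let pos : Int := 1 <<< i.toNat
  let tmp : Int := PySem.Int.band c pos
  if tmp = 0 then
    let cnt := if PySem.Int.band a pos ≠ 0 then cnt + 1 else cnt
    if PySem.Int.band b pos ≠ 0 then cnt + 1 else cnt
  else
    if ¬(PySem.Int.band a pos ≠ 0 ∨ PySem.Int.band b pos ≠ 0) then cnt + 1 else cnt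

def getFlipCount (a : Int) (b : Int) (c : Int) : Int :=
  (PySem.List.pyRange 0 32 1).foldl (pvStepA a b c) 0

-- ===== PORT B =====
-- Source B's while-loop popcount; its arguments are Source B's masked values, which are nonnegative, tracked as Nat
def popAux (n : Nat) : Nat :=
  if _h : n = 0 then 0 else (n &&& 1) + popAux (n >>> 1)
termination_by n
decreasing_by simp [Nat.shiftRight_one]; omega

def pop (n : Int) : Int := (popAux n.toNat : Nat)

def getFlipCount_alt (a : Int) (b : Int) (c : Int) : Int :=
  let mask : Int := (1 : Int) <<< 32 - 1
  let A := PySem.Int.band a mask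
  let B := PySem.Int.band b mask
  let C := PySem.Int.band c mask
  let nC := PySem.Int.bxor C mask
  pop (PySem.Int.band A nC) + pop (PySem.Int.band B nC) +
    pop (PySem.Int.band (PySem.Int.band (PySem.Int.bxor A mask) (PySem.Int.bxor B mask)) C)

-- ===== PRECONDITION & SPEC =====
def Spec_getFlipCount (a : Int) (b : Int) (c : Int) (out : Int) : Prop := out = getFlipCount_alt a b c
instance (a : Int) (b : Int) (c : Int) (out : Int) : Decidable (Spec_getFlipCount a b c out) := by unfold Spec_getFlipCount; infer_instance

-- ===== CLAIM (what is proved, stated in full; the proofs are below) =====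
def Claim_equal_getFlipCount : Prop := ∀ (a : Int) (b : Int) (c : Int), Dom_getFlipCount a b c → Spec_getFlipCount a b c (getFlipCount a b c)

-- ===== LEMMAS AND PROOFS =====

-- the low 32 bits of a, as a natural number
def lowBits (a : Int) : Nat := (a % 4294967296).toNat

-- the amount A's loop body adds to the accumulator at index i
def stepAdd (a b c : Int) (i : Int) : Int :=
  let pos : Int := 1 <<< i.toNat
  if PySem.Int.band c pos = 0 then
    (if PySem.Int.band a pos ≠ 0 then (1:Int) else 0) + (if PySem.Int.band b pos ≠ 0 then (1:Int) else 0)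
  else
    if ¬(PySem.Int.band a pos ≠ 0 ∨ PySem.Int.band b pos ≠ 0) then 1 else 0

lemma lowBits_lt (a : Int) : lowBits a < 2 ^ 32 := by
  unfold lowBits
  have : (a % 4294967296).toNat < 4294967296 := by omega
  simpa using this

lemma band_mask_eq (a : Int) : PySem.Int.band a 4294967295 = a % 4294967296 := by
  unfold PySem.Int.band
  by_cases h : 0 ≤ a
  · rw [if_pos h, if_pos (by norm_num : (0:Int) ≤ 4294967295)]
    have h1 : a.toNat &&& (4294967295 : Int).toNat = a.toNat % 4294967296 := by
      have := Nat.and_two_pow_sub_one_eq_mod a.toNat 32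
      norm_num at this
      simpa using this
    rw [h1]; omega
  · rw [if_neg h, if_pos (by norm_num : (0:Int) ≤ 4294967295)]
    have h1 : (4294967295 : Int).toNat &&& (-a - 1).toNat = (-a - 1).toNat % 4294967296 := by
      have := Nat.and_two_pow_sub_one_eq_mod (-a - 1).toNat 32
      rw [Nat.and_comm] at this
      norm_num at this
      simpa using this
    rw [h1]; omega

lemma compl_testBit (s i : Nat) (hs : s < 2 ^ 32) (hi : i < 32) :
    (2 ^ 32 - 1 - s).testBit i = ! s.testBit i := by
  have hv : (BitVec.ofNat 32 s).toNat = s := by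
    simp only [BitVec.toNat_ofNat]
    omega
  have h1 : 2 ^ 32 - 1 - s = (~~~(BitVec.ofNat 32 s)).toNat := by
    rw [BitVec.toNat_not, hv]
  rw [h1, BitVec.testBit_toNat, BitVec.getLsbD_not]
  have h2 : s.testBit i = (BitVec.ofNat 32 s).getLsbD i := by
    conv_lhs => rw [← hv]
    rw [BitVec.testBit_toNat]
  rw [← h2]
  simp [hi]

lemma band_pow_ne (a : Int) (i : Nat) (hi : i < 32) :
    (PySem.Int.band a ((1:Int) <<< i) ≠ 0) ↔ (lowBits a).testBit i = true := by
  have hpow : ((1:Int) <<< i) = ((2 ^ i : Nat) : Int) := by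
    rw [Int.shiftLeft_eq]; push_cast; ring
  have hpt : ((2 ^ i : Nat) : Int).toNat = 2 ^ i := Int.toNat_natCast _
  unfold lowBits
  by_cases h : 0 ≤ a
  · rw [hpow, PySem.Int.band_of_nonneg h (by positivity), hpt, Nat.and_two_pow]
    have hx : (a % 4294967296).toNat = a.toNat % 4294967296 := by omega
    have hx2 : a.toNat % 4294967296 = a.toNat % 2 ^ 32 := by norm_num
    rw [hx, hx2, Nat.testBit_mod_two_pow]
    cases h' : a.toNat.testBit i <;> simp [h', hi]
  · unfold PySem.Int.band
    rw [hpow, if_neg h, if_pos (by positivity), hpt]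
    rw [Nat.two_pow_and]
    have hx : (a % 4294967296).toNat = 4294967295 - (-a - 1).toNat % 4294967296 := by omega
    have hx2 : (4294967295 : Nat) - (-a - 1).toNat % 4294967296
        = 2 ^ 32 - 1 - ((-a - 1).toNat % 2 ^ 32) := by norm_num
    rw [hx, hx2, compl_testBit _ i (Nat.mod_lt _ (by norm_num)) hi, Nat.testBit_mod_two_pow]
    cases h' : (-a - 1).toNat.testBit i <;> simp [h', hi]

lemma band_pow_eq (a : Int) (i : Nat) (hi : i < 32) :
    (PySem.Int.band a ((1:Int) <<< i) = 0) ↔ (lowBits a).testBit i = false := by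
  have := (band_pow_ne a i hi).not
  push_neg at this
  simpa using this

lemma maskBit (i : Nat) (hi : i < 32) : (4294967295 : Nat).testBit i = true := by
  have := Nat.testBit_two_pow_sub_one 32 i
  norm_num at this
  simp [this, hi]

lemma popAux_eq_sum (k : Nat) : ∀ n, n < 2 ^ k →
    popAux n = ((List.range k).map (fun i => (n.testBit i).toNat)).sum := by
  induction k with
  | zero =>
    intro n hn
    have : n = 0 := by simpa using hn
    subst this
    rw [popAux]; simp
  | succ k ih =>
    intro n hn
    by_cases hn0 : n = 0
    · subst hn0
      rw [popAux]; simp [Nat.zero_testBit]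
    · rw [popAux, dif_neg hn0, Nat.and_one_is_mod, Nat.shiftRight_one]
      have h2 : n / 2 < 2 ^ k := by
        have : 2 ^ (k + 1) = 2 * 2 ^ k := by ring
        omega
      rw [ih _ h2, List.range_succ_eq_map]
      simp only [List.map_cons, List.map_map, List.sum_cons]
      have h0 : (n.testBit 0).toNat = n % 2 := by
        rcases Nat.mod_two_eq_zero_or_one n with h | h <;> simp [Nat.testBit_zero, h]
      have h1 : ((fun i => (n.testBit i).toNat) ∘ Nat.succ) = fun i => ((n / 2).testBit i).toNat := by
        funext i
        simp [Function.comp, Nat.succ_eq_add_one, Nat.testBit_add_one]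
      rw [h1]
      omega

lemma sum_map_add {α : Type} (l : List α) (f g : α → Int) :
    (l.map (fun x => f x + g x)).sum = (l.map f).sum + (l.map g).sum := by
  induction l with
  | nil => simp
  | cons h t ih => simp [ih]; ring

lemma pyRange32 : PySem.List.pyRange 0 32 1 = (List.range 32).map (fun n : Nat => (n : Int)) := by
  decide

lemma a_eq (a b c : Int) :
    getFlipCount a b c = ((List.range 32).map (fun n : Nat => stepAdd a b c (n : Int))).sum := by
  unfold getFlipCount
  have hstep : pvStepA a b c = fun cnt i => cnt + stepAdd a b c i := by
    funext cnt i
    simp only [pvStepA, stepAdd]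
    split_ifs <;> ring
  rw [hstep, PySem.List.foldl_add, pyRange32, List.map_map]
  simp only [zero_add, Function.comp_def]

lemma alt_eq (a b c : Int) : getFlipCount_alt a b c =
    ((popAux (lowBits a &&& (lowBits c ^^^ 4294967295)) : Nat) : Int)
    + ((popAux (lowBits b &&& (lowBits c ^^^ 4294967295)) : Nat) : Int)
    + ((popAux (((lowBits a ^^^ 4294967295) &&& (lowBits b ^^^ 4294967295)) &&& lowBits c) : Nat) : Int) := by
  have hmask : (1:Int) <<< 32 - 1 = (4294967295 : Int) := by decide
  have hlow : ∀ x : Int, PySem.Int.band x 4294967295 = ((lowBits x : Nat) : Int) := by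
    intro x; rw [band_mask_eq]; unfold lowBits; omega
  simp only [getFlipCount_alt, pop, hmask, hlow]
  have hxor : ∀ u : Nat, PySem.Int.bxor ((u : Nat) : Int) 4294967295 = ((u ^^^ 4294967295 : Nat) : Int) := by
    intro u
    rw [PySem.Int.bxor_of_nonneg (by positivity) (by norm_num)]
    simp
  have hband : ∀ u v : Nat, PySem.Int.band ((u : Nat) : Int) ((v : Nat) : Int) = ((u &&& v : Nat) : Int) := by
    intro u v
    rw [PySem.Int.band_of_nonneg (by positivity) (by positivity)]
    simp
  rw [hxor, hxor, hxor, hband, hband, hband, hband]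
  simp

lemma per_bit (a b c : Int) (i : Nat) (hi : i < 32) :
    stepAdd a b c (i : Int) =
      (((lowBits a &&& (lowBits c ^^^ 4294967295)).testBit i).toNat
      + ((lowBits b &&& (lowBits c ^^^ 4294967295)).testBit i).toNat
      + ((((lowBits a ^^^ 4294967295) &&& (lowBits b ^^^ 4294967295)) &&& lowBits c).testBit i).toNat : Nat) := by
  unfold stepAdd
  simp only [Int.toNat_natCast, Nat.testBit_land, Nat.testBit_xor, maskBit i hi]
  cases hA : (lowBits a).testBit i <;> cases hB : (lowBits b).testBit i <;>
    cases hC : (lowBits c).testBit i <;>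
      simp [band_pow_eq a i hi, band_pow_eq b i hi, band_pow_eq c i hi, hA, hB, hC]

-- ===== VERDICT (by name: the statement is the Claim_ definition above) =====
theorem getFlipCount_spec : Claim_equal_getFlipCount := by
  intro a b c _
  unfold Spec_getFlipCount
  rw [a_eq, alt_eq]
  have h1 : lowBits a &&& (lowBits c ^^^ 4294967295) < 2 ^ 32 :=
    lt_of_le_of_lt Nat.and_le_left (lowBits_lt a)
  have h2 : lowBits b &&& (lowBits c ^^^ 4294967295) < 2 ^ 32 :=
    lt_of_le_of_lt Nat.and_le_left (lowBits_lt b)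
  have h3 : ((lowBits a ^^^ 4294967295) &&& (lowBits b ^^^ 4294967295)) &&& lowBits c < 2 ^ 32 :=
    lt_of_le_of_lt Nat.and_le_right (lowBits_lt c)
  rw [popAux_eq_sum 32 _ h1, popAux_eq_sum 32 _ h2, popAux_eq_sum 32 _ h3]
  rw [Nat.cast_list_sum, Nat.cast_list_sum, Nat.cast_list_sum, List.map_map, List.map_map, List.map_map]
  rw [← sum_map_add, ← sum_map_add]
  simp only [Function.comp_def]
  refine congrArg List.sum (List.map_congr_left ?_)
  intro i hi'
  have hi := List.mem_range.mp hi'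
  rw [per_bit a b c i hi]
  push_cast
  ring
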